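-- pv_equiv track=rewrite | github.com/TacheRadu/StatesOfTheWorld | tools/hlp.py | get_number_and_decimals
-- ===== SOURCE A (Python) =====
-- def get_number_and_decimals(string: str, delimiters: list[str]) -> tuple[int, int]:
--     """
--     Parse a string and get its corresponding number, in the form of two values: the number as an int with the delimiters
--     removed and another int representing the number of decimals
--     :param string: string to parse
--     :param delimiters: list of string delimiters. If any character other than these or a digit is found, parsing stops.
--     The last delimiter should be the one representing the decimals delimiter. It will be used to compute the number of
--     decimals
--     :return: tuple with the number without decimal point and the number of decimals (e.g. for '123.23' it will return
--     (12323, 2)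
--     :rtype: tuple[int, int]
--     """
--     number_chars = []
--     numbers_after_last_delimiter = 0
--     increment_factor = 0
--     for c in string.strip():
--         if not c.isdigit() and c not in delimiters:
--             break
--         if c not in delimiters:
--             number_chars.append(c)
--             numbers_after_last_delimiter += increment_factor
--         elif c == delimiters[-1]:
--             numbers_after_last_delimiter = 0
--             increment_factor = 1
--     try:
--         return int(''.join(number_chars)), numbers_after_last_delimiter
--     except ValueError:
--         return 0, 0
-- ===== SOURCE B (Python) =====
-- from itertools import takewhile
--
--
-- def get_number_and_decimals(string: str, delimiters: list[str]) -> tuple[int, int]: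
--     # Build the parsed prefix once, then derive the number and the decimal count separately.
--     prefix = list(takewhile(lambda c: c.isdigit() or c in delimiters, string.strip()))
--     digits = [c for c in prefix if c.isdigit() and c not in delimiters]
--     try:
--         number = int(''.join(digits))
--     except ValueError:
--         return 0, 0
--     decimals = 0
--     if delimiters:
--         last = delimiters[-1]
--         # chars of the prefix strictly after the last occurrence of the decimals delimiter
--         tail_rev = list(takewhile(lambda c: c != last, reversed(prefix)))
--         if len(tail_rev) < len(prefix):
--             decimals = sum(1 for c in tail_rev if c.isdigit() and c not in delimiters)
--     return number, decimals
-- ===== Notes on version B (the rewrite author's own statement) =====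
-- stated objective: alternative
-- what changed: A threads number chars, a decimals counter and an increment flag through one accumulating interpreted loop with break; B extracts the valid prefix once with itertools.takewhile and then derives the number (digits of the prefix) and the decimal count (digits after the last occurrence of the decimals delimiter, found by a reversed takewhile) as separate passes over that prefix, pushing the per-character work into C-level iterators/comprehensions.
import Mathlib
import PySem

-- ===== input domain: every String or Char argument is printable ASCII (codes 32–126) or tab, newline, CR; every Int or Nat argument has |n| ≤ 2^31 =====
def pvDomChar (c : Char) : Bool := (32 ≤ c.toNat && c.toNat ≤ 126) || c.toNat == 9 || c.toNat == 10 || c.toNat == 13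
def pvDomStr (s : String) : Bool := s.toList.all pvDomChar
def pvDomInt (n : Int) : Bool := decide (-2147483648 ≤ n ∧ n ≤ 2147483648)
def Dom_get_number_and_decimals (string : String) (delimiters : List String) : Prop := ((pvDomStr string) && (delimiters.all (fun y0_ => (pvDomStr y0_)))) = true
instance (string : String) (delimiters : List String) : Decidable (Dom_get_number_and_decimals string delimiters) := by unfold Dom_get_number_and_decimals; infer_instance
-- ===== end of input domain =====

-- B rebuilds the result from a takewhile-extracted prefix (number and decimal count derived
-- separately from it) instead of A's single accumulating loop; objective: alternative decomposition.


-- ===== PORT A =====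
-- A's for-loop with break, state (number_chars, numbers_after_last_delimiter, increment_factor)
def pvLoopA (delimiters : List String) : List Char → List Char → Int → Int → List Char × Int
  | [], numberChars, ctr, _ => (numberChars, ctr)
  | c :: rest, numberChars, ctr, factor =>
    if !PySem.Chars.isdigit c && !decide (String.mk [c] ∈ delimiters) then
      (numberChars, ctr)                                   -- break
    else if !decide (String.mk [c] ∈ delimiters) then
      pvLoopA delimiters rest (numberChars ++ [c]) (ctr + factor) factor
    else if PySem.List.pyGet? delimiters (-1) = some (String.mk [c]) then
      pvLoopA delimiters rest numberChars 0 1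
    else
      pvLoopA delimiters rest numberChars ctr factor

def get_number_and_decimals (string : String) (delimiters : List String) : Int × Int :=
  let r := pvLoopA delimiters (PySem.Str.strip string).toList [] 0 0
  match PySem.Int.ofChars? r.1 with                        -- int(''.join(number_chars)); none = ValueError
  | some n => (n, r.2)
  | none => (0, 0)

-- ===== PORT B =====
def pvPredB (delimiters : List String) (c : Char) : Bool :=
  PySem.Chars.isdigit c || decide (String.mk [c] ∈ delimiters)

def pvGoodB (delimiters : List String) (c : Char) : Bool :=
  PySem.Chars.isdigit c && !decide (String.mk [c] ∈ delimiters)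

-- digits of the prefix strictly after the last occurrence of the decimals delimiter (`last?` is
-- `delimiters[-1]` when `delimiters` is non-empty, mirroring Python's `if delimiters:` guard)
def pvDecAux (delimiters : List String) : Option String → List Char → Int
  | none, _ => 0
  | some last, pfx =>
    let tailRev := pfx.reverse.takeWhile (fun c => decide (String.mk [c] ≠ last))
    if tailRev.length < pfx.length then
      ((tailRev.filter (pvGoodB delimiters)).length : Int)
    else 0

def get_number_and_decimals_alt (string : String) (delimiters : List String) : Int × Int :=
  let pfx := (PySem.Str.strip string).toList.takeWhile (pvPredB delimiters)
  let digits := pfx.filter (pvGoodB delimiters)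
  match PySem.Int.ofChars? digits with                     -- int(''.join(digits)); none = ValueError
  | none => (0, 0)
  | some number => (number, pvDecAux delimiters delimiters.getLast? pfx)

-- ===== PRECONDITION & SPEC =====
def Spec_get_number_and_decimals (string : String) (delimiters : List String) (out : Int × Int) : Prop := out = get_number_and_decimals_alt string delimiters
instance (string : String) (delimiters : List String) (out : Int × Int) : Decidable (Spec_get_number_and_decimals string delimiters out) := by unfold Spec_get_number_and_decimals; infer_instance

-- ===== CLAIM (what is proved, stated in full; the proofs are below) =====
def Claim_equal_get_number_and_decimals : Prop := ∀ (string : String) (delimiters : List String), Dom_get_number_and_decimals string delimiters → Spec_get_number_and_decimals string delimiters (get_number_and_decimals string delimiters)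

-- ===== LEMMAS AND PROOFS =====

-- what A's counter ends as, given the parsed prefix p and the incoming state (ctr, f)
def pvCtrSpec (delimiters : List String) : Option String → Int → Int → List Char → Int
  | none, ctr, f, p => ctr + f * ((p.filter (pvGoodB delimiters)).length : Int)
  | some last, ctr, f, p =>
    if p.any (fun c => decide (String.mk [c] = last)) then
      (((p.reverse.takeWhile (fun c => decide (String.mk [c] ≠ last))).filter (pvGoodB delimiters)).length : Int)
    else
      ctr + f * ((p.filter (pvGoodB delimiters)).length : Int)

theorem pv_takeWhile_append_of_bad {l t : List Char} {q : Char → Bool} {x : Char}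
    (hx : x ∈ l) (h : ¬ q x) : (l ++ t).takeWhile q = l.takeWhile q := by
  induction l with
  | nil => simp at hx
  | cons a l ih =>
    rcases List.mem_cons.mp hx with rfl | hx
    · simp [h]
    · by_cases hq : q a <;> simp [hq]
      exact ih hx

theorem pv_pyGet_neg_one (xs : List String) : PySem.List.pyGet? xs (-1) = xs.getLast? := by
  simp [PySem.List.pyGet?, PySem.List.pyIdx?]
  rcases xs with _ | ⟨a, t⟩ <;> simp [List.getLast?_eq_getElem?]

theorem pv_tr_cons_occ (last : String) (c : Char) (p : List Char)
    (hocc : p.any (fun c => decide (String.mk [c] = last)) = true) :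
    (c :: p).reverse.takeWhile (fun c => decide (String.mk [c] ≠ last)) =
      p.reverse.takeWhile (fun c => decide (String.mk [c] ≠ last)) := by
  obtain ⟨x, hx, hxv⟩ := List.any_eq_true.mp hocc
  rw [List.reverse_cons]
  exact pv_takeWhile_append_of_bad (List.mem_reverse.mpr hx) (by simp at hxv ⊢; exact hxv)

theorem pv_any_cons_of_ne (last : String) (c : Char) (p : List Char)
    (hc : String.mk [c] ≠ last) :
    (c :: p).any (fun c => decide (String.mk [c] = last)) =
      p.any (fun c => decide (String.mk [c] = last)) := by simp [hc]

-- step lemma: the counter spec through one kept character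
theorem pvCtrSpec_cons_ne (delimiters : List String) (last? : Option String) (ctr f : Int)
    (c : Char) (p : List Char) (hc : ∀ last, last? = some last → String.mk [c] ≠ last) :
    pvCtrSpec delimiters last? ctr f (c :: p) =
      pvCtrSpec delimiters last? (ctr + f * (if pvGoodB delimiters c then 1 else 0)) f p := by
  cases last? with
  | none =>
    simp only [pvCtrSpec, List.filter_cons]
    by_cases hg : pvGoodB delimiters c <;> simp [hg] <;> try ring
  | some last =>
    have hcl := hc last rfl
    simp only [pvCtrSpec, pv_any_cons_of_ne last c p hcl]
    by_cases hocc : p.any (fun c => decide (String.mk [c] = last)) = true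
    · rw [if_pos hocc, if_pos hocc, pv_tr_cons_occ last c p hocc]
    · rw [if_neg hocc, if_neg hocc]
      simp only [List.filter_cons]
      by_cases hg : pvGoodB delimiters c <;> simp [hg] <;> try ring

-- step lemma: the counter spec through the decimals delimiter itself (reset)
theorem pvCtrSpec_cons_last (delimiters : List String) (last : String) (ctr f : Int)
    (c : Char) (p : List Char) (hc : String.mk [c] = last) :
    pvCtrSpec delimiters (some last) ctr f (c :: p) =
      pvCtrSpec delimiters (some last) 0 1 p := by
  have hup : (c :: p).any (fun c => decide (String.mk [c] = last)) = true := by simp [hc]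
  simp only [pvCtrSpec, hup, if_true]
  by_cases hocc : p.any (fun c => decide (String.mk [c] = last)) = true
  · rw [if_pos hocc, pv_tr_cons_occ last c p hocc]
  · rw [if_neg hocc]
    have hall : ∀ x ∈ p.reverse, (fun c => decide (String.mk [c] ≠ last)) x = true := by
      intro x hx
      simp only [decide_eq_true_eq]
      intro hxv
      exact hocc (List.any_eq_true.mpr ⟨x, List.mem_reverse.mp hx, by simp [hxv]⟩)
    have htw : (c :: p).reverse.takeWhile (fun c => decide (String.mk [c] ≠ last)) = p.reverse := by
      rw [List.reverse_cons, List.takeWhile_append, List.takeWhile_eq_self_iff.mpr hall]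
      simp [hc]
    rw [htw]
    simp [List.filter_reverse]

theorem pvCtrSpec_nil (delimiters : List String) (last? : Option String) (ctr f : Int) :
    pvCtrSpec delimiters last? ctr f [] = ctr := by
  cases last? <;> simp [pvCtrSpec]

-- the loop is: append the good chars of the parsed prefix, and the counter spec over it
theorem pvLoopA_spec (delimiters : List String) (cs : List Char) : ∀ acc ctr f,
    pvLoopA delimiters cs acc ctr f =
      (acc ++ (cs.takeWhile (pvPredB delimiters)).filter (pvGoodB delimiters),
       pvCtrSpec delimiters delimiters.getLast? ctr f (cs.takeWhile (pvPredB delimiters))) := by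
  induction cs with
  | nil => intro acc ctr f; simp [pvLoopA, pvCtrSpec_nil]
  | cons c rest ih =>
    intro acc ctr f
    by_cases hpred : pvPredB delimiters c = true
    · rw [List.takeWhile_cons_of_pos hpred]
      by_cases hmem : String.mk [c] ∈ delimiters
      · -- c is a delimiter: not appended; counter resets iff c equals the last delimiter
        have hdig : pvGoodB delimiters c = false := by simp [pvGoodB, hmem]
        have hne : delimiters ≠ [] := by rintro rfl; simp at hmem
        obtain ⟨last, hlast⟩ := Option.isSome_iff_exists.mp (List.getLast?_isSome.mpr hne)
        rw [pvLoopA]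
        simp only [hmem, decide_true, Bool.not_true, Bool.and_false, Bool.false_eq_true,
          if_false, pv_pyGet_neg_one, hlast]
        by_cases hc : String.mk [c] = last
        · rw [if_pos (by rw [hc]), ih, hlast, List.filter_cons_of_neg (by simp [hdig]),
            pvCtrSpec_cons_last delimiters last ctr f c _ hc]
        · rw [if_neg (by simp; exact fun h => hc h.symm), ih, hlast,
            List.filter_cons_of_neg (by simp [hdig]),
            pvCtrSpec_cons_ne delimiters (some last) ctr f c _
              (by intro l hl hv; injection hl with hl; exact hc (hl ▸ hv))]
          simp [hdig]
      · -- a digit outside the delimiters: appended, counter += factor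
        have hdigit : PySem.Chars.isdigit c = true := by
          have h := hpred; simp [pvPredB, hmem] at h; exact h
        have hgood : pvGoodB delimiters c = true := by simp [pvGoodB, hdigit, hmem]
        have hcne : ∀ last, delimiters.getLast? = some last → String.mk [c] ≠ last := by
          intro l hl hv
          exact hmem (hv ▸ List.mem_of_getLast? hl)
        rw [pvLoopA]
        simp only [hdigit, hmem, decide_false, Bool.not_false, Bool.not_true,
          Bool.false_eq_true, if_false, Bool.and_true, if_true, ih]
        rw [List.filter_cons_of_pos (by simp [hgood]),
          pvCtrSpec_cons_ne delimiters delimiters.getLast? ctr f c _ hcne]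
        simp [hgood]
    · -- parsing stops here
      have hpred' : pvPredB delimiters c = false := by simpa using hpred
      have h12 : PySem.Chars.isdigit c = false ∧ String.mk [c] ∉ delimiters := by
        simpa [pvPredB] using hpred'
      rw [List.takeWhile_cons_of_neg (by simp [hpred']), pvLoopA]
      simp only [h12.1, h12.2, decide_false, Bool.not_false, Bool.and_true, if_true]
      simp [pvCtrSpec_nil]

-- the loop's final counter from the initial state (0, 0) is B's decimal count
theorem pvCtrSpec_zero (delimiters : List String) (p : List Char) :
    pvCtrSpec delimiters delimiters.getLast? 0 0 p = pvDecAux delimiters delimiters.getLast? p := by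
  cases hl : delimiters.getLast? with
  | none => simp [pvCtrSpec, pvDecAux]
  | some last =>
    simp only [pvCtrSpec, pvDecAux]
    by_cases hocc : p.any (fun c => decide (String.mk [c] = last)) = true
    · rw [if_pos hocc]
      have hlt : ((p.reverse.takeWhile (fun c => decide (String.mk [c] ≠ last))).length < p.length) := by
        obtain ⟨x, hx, hxv⟩ := List.any_eq_true.mp hocc
        rcases Nat.lt_or_ge ((p.reverse.takeWhile (fun c => decide (String.mk [c] ≠ last))).length) p.length with h | h
        · exact h
        · exfalso
          have heq : p.reverse.takeWhile (fun c => decide (String.mk [c] ≠ last)) = p.reverse :=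
            (List.takeWhile_prefix _).eq_of_length (by
              have hle := (List.takeWhile_prefix (l := p.reverse) (fun c => decide (String.mk [c] ≠ last))).length_le
              rw [List.length_reverse] at hle ⊢; omega)
          have := List.takeWhile_eq_self_iff.mp heq x (List.mem_reverse.mpr hx)
          simp at this hxv
          exact this hxv
      simp only [decide_not] at hlt
      simp [hlt]
    · rw [if_neg hocc]
      have hall : ∀ x ∈ p.reverse, (fun c => decide (String.mk [c] ≠ last)) x = true := by
        intro x hx
        simp only [decide_eq_true_eq]
        intro hxv
        exact hocc (List.any_eq_true.mpr ⟨x, List.mem_reverse.mp hx, by simp [hxv]⟩)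
      rw [List.takeWhile_eq_self_iff.mpr hall, List.length_reverse]
      simp

-- ===== VERDICT (by name: the statement is the Claim_ definition above) =====
theorem get_number_and_decimals_spec : Claim_equal_get_number_and_decimals := by
  intro string delimiters _
  unfold Spec_get_number_and_decimals get_number_and_decimals get_number_and_decimals_alt
  rw [pvLoopA_spec, pvCtrSpec_zero]
  simp only [List.nil_append]
  cases PySem.Int.ofChars?
      ((((PySem.Str.strip string).toList).takeWhile (pvPredB delimiters)).filter (pvGoodB delimiters)) <;>
    simp
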